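-- pv_equiv track=rewrite | github.com/parkjjoe/algorithms | 프로그래머스/0/181935. 홀짝에 따라 다른 값 반환하기/홀짝에 따라 다른 값 반환하기.py | solution
-- ===== SOURCE A (Python) =====
-- def solution(n):
--     odd, even = 0, 0
--
--     if n % 2 == 0:
--         for i in range(0, n+1, 2):
--             even += i ** 2
--     else:
--         for i in range(1, n+1, 2):
--             odd += i
--     return even if n % 2 == 0 else odd
-- ===== SOURCE B (Python) =====
-- def solution(n):
--     if n < 0:
--         return 0
--     if n % 2 == 0:
--         m = n // 2
--         return 2 * m * (m + 1) * (2 * m + 1) // 3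
--     k = (n + 1) // 2
--     return k * k
-- ===== Notes on version B (the rewrite author's own statement) =====
-- stated objective: faster
-- what changed: Replaces A's O(n) summation loop (sum of even squares / sum of odds up to n) with O(1) closed-form arithmetic-series formulas.
import Mathlib
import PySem

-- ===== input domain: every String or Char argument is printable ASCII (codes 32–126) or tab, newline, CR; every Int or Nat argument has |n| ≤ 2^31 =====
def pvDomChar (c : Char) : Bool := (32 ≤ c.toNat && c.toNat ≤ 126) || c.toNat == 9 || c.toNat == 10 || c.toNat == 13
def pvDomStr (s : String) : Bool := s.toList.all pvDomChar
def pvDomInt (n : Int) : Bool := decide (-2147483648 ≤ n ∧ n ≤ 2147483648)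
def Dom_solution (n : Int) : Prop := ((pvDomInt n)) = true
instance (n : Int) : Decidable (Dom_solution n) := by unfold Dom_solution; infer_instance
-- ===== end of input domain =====

-- B replaces A's O(n) summation loops by O(1) closed-form arithmetic-series formulas (objective: faster).

-- ===== PORT A =====
def solution (n : Int) : Int :=
  let odd : Int := 0
  let even : Int := 0
  if PySem.Int.mod n 2 = 0 then
    let even := (PySem.List.pyRange 0 (n + 1) 2).foldl (fun acc i => acc + i ^ 2) even
    even
  else
    let odd := (PySem.List.pyRange 1 (n + 1) 2).foldl (fun acc i => acc + i) odd
    odd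

-- ===== PORT B =====
def solution_alt (n : Int) : Int :=
  if n < 0 then 0
  else if PySem.Int.mod n 2 = 0 then
    let m := PySem.Int.floordiv n 2
    PySem.Int.floordiv (2 * m * (m + 1) * (2 * m + 1)) 3
  else
    let k := PySem.Int.floordiv (n + 1) 2
    k * k

-- ===== PRECONDITION & SPEC =====
def Spec_solution (n : Int) (out : Int) : Prop := out = solution_alt n
instance (n : Int) (out : Int) : Decidable (Spec_solution n out) := by unfold Spec_solution; infer_instance

-- ===== CLAIM (what is proved, stated in full; the proofs are below) =====
def Claim_equal_solution : Prop := ∀ (n : Int), Dom_solution n → Spec_solution n (solution n)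

-- ===== LEMMAS AND PROOFS =====

lemma sum_even_squares (m : Nat) :
    3 * ((List.range m).map (fun k : Nat => ((0 : Int) + 2 * (k : Int)) ^ 2)).sum
      = 2 * ((m : Int) - 1) * (m : Int) * (2 * (m : Int) - 1) := by
  induction m with
  | zero => simp
  | succ m ih =>
      rw [List.range_succ]
      simp only [List.map_append, List.sum_append, List.map_cons, List.map_nil,
        List.sum_cons, List.sum_nil, Nat.cast_add, Nat.cast_one]
      linear_combination ih

lemma sum_odds (m : Nat) :
    ((List.range m).map (fun k : Nat => (1 : Int) + 2 * (k : Int))).sum = (m : Int) * (m : Int) := by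
  induction m with
  | zero => simp
  | succ m ih =>
      rw [List.range_succ]
      simp only [List.map_append, List.sum_append, List.map_cons, List.map_nil,
        List.sum_cons, List.sum_nil, Nat.cast_add, Nat.cast_one]
      linear_combination ih

-- ===== VERDICT (by name: the statement is the Claim_ definition above) =====
theorem solution_spec : Claim_equal_solution := by
  intro n _
  unfold Spec_solution solution solution_alt
  have hmod := PySem.Int.mod_eq_zero_iff_dvd n 2
  by_cases he : PySem.Int.mod n 2 = 0
  · -- n even
    obtain ⟨m, hm⟩ := hmod.mp he
    simp only [he, if_true]
    rw [PySem.List.pyRange_of_pos 0 (n + 1) (by norm_num)]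
    rw [PySem.List.foldl_add]
    by_cases hneg : n < 0
    · have hlt : ¬ (0 : Int) < n + 1 := by omega
      simp [hneg, hlt]
    · rw [if_neg hneg]
      have hm0 : 0 ≤ m := by omega
      have hd : ((n + 1 - 0 + 2 - 1) / 2).toNat = m.toNat + 1 := by
        subst hm; omega
      rw [if_pos (by omega : (0 : Int) < n + 1), hd, List.map_map]
      have hfd : PySem.Int.floordiv n 2 = m := by
        rw [PySem.Int.floordiv_eq_iff_of_pos (by norm_num)]; omega
      rw [hfd]
      have hc : ((m.toNat + 1 : Nat) : Int) = m + 1 := by omega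
      have hS : 3 * (List.map ((fun i => i ^ 2) ∘ (fun k : Nat => (0 : Int) + 2 * (k : Int)))
            (List.range (m.toNat + 1))).sum
          = 2 * ((m + 1) - 1) * (m + 1) * (2 * (m + 1) - 1) := by
        have hs := sum_even_squares (m.toNat + 1)
        rw [hc] at hs
        exact hs
      set S : Int := (List.map ((fun i => i ^ 2) ∘ (fun k : Nat => (0 : Int) + 2 * (k : Int)))
        (List.range (m.toNat + 1))).sum with hSdef
      have h2 : 2 * m * (m + 1) * (2 * m + 1) = 3 * S := by linear_combination -hS
      have h3 : PySem.Int.floordiv (3 * S) 3 = S := by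
        rw [PySem.Int.floordiv_eq_iff_of_pos (by norm_num)]; omega
      rw [h2, h3]; ring
  · -- n odd
    obtain ⟨m, hm⟩ : ∃ m, n = 2 * m + 1 := by
      rcases Int.even_or_odd n with ⟨k, hk⟩ | ⟨k, hk⟩
      · exact absurd (hmod.mpr ⟨k, by omega⟩) he
      · exact ⟨k, hk⟩
    simp only [he, if_false]
    rw [PySem.List.pyRange_of_pos 1 (n + 1) (by norm_num)]
    rw [PySem.List.foldl_add]
    by_cases hneg : n < 0
    · have hlt : ¬ (1 : Int) < n + 1 := by omega
      simp [hneg, hlt]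
    · rw [if_neg hneg]
      have hm0 : 0 ≤ m := by omega
      have hd : ((n + 1 - 1 + 2 - 1) / 2).toNat = m.toNat + 1 := by
        subst hm; omega
      rw [if_pos (by omega : (1 : Int) < n + 1), hd, List.map_map]
      have hfd : PySem.Int.floordiv (n + 1) 2 = m + 1 := by
        rw [PySem.Int.floordiv_eq_iff_of_pos (by norm_num)]; omega
      rw [hfd]
      have hc : ((m.toNat + 1 : Nat) : Int) = m + 1 := by omega
      have hS : (List.map ((fun i => i) ∘ (fun k : Nat => (1 : Int) + 2 * (k : Int)))
            (List.range (m.toNat + 1))).sum = (m + 1) * (m + 1) := by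
        have hs := sum_odds (m.toNat + 1)
        rw [hc] at hs
        exact hs
      rw [hS]; ring
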